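-- pv_equiv track=rewrite | github.com/Alyssonmach/sim-f3dd | utils/extract_model.py | generate_frame3dd_data
-- ===== SOURCE A (Python) =====
-- def generate_frame3dd_data(layers_dict: dict, customize_layers: list) -> tuple:
--     '''
--     Gera dados do modelo para o Frame3DD.
--
--     Args:
--         layers_dict (dict): Dicionário com as ligações separadas por camadas.
--         customize_layers (list): Lista com as camadas a serem consideradas.
--
--     Returns:
--         tuple_values (tuple): Informação de nós e ligações do modelo.
--     '''
--
--     id_counter = 1
--     id_conexion = 1
--     nodes_dict = dict()
--
--     nodes_list, conexions_list = list(), list()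
--
--     for layer, conexions in layers_dict.items():
--         if layer in customize_layers:
--             for conexion in conexions:
--                 start = conexion["start_point"]
--                 end = conexion["end_point"]
--
--                 if start not in nodes_dict:
--                     nodes_dict[start] = id_counter
--                     nodes_list.append([id_counter, *start])
--                     id_counter += 1
--
--                 if end not in nodes_dict:
--                     nodes_dict[end] = id_counter
--                     nodes_list.append([id_counter, *end])
--                     id_counter += 1
--
--                 conexions_list.append([id_conexion, nodes_dict[start], nodes_dict[end]])
--                 id_conexion += 1
--
--     return (nodes_list, conexions_list)
-- ===== SOURCE B (Python) =====
-- def generate_frame3dd_data(layers_dict: dict, customize_layers: list) -> tuple: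
--     '''Two-pass rewrite: flatten the selected connections once, build the
--     node-id table in a first pass, then emit the connection rows.'''
--     selected = [conexion
--                 for layer, conexions in layers_dict.items()
--                 if layer in customize_layers
--                 for conexion in conexions]
--
--     nodes = {}
--     for conexion in selected:
--         for point in (conexion["start_point"], conexion["end_point"]):
--             if point not in nodes:
--                 nodes[point] = len(nodes) + 1
--
--     nodes_list = [[i, *point] for point, i in nodes.items()]
--     conexions_list = [[k, nodes[c["start_point"]], nodes[c["end_point"]]]
--                       for k, c in enumerate(selected, 1)]
--     return (nodes_list, conexions_list)
-- ===== Notes on version B (the rewrite author's own statement) =====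
-- stated objective: simpler
-- what changed: Replaces A's single interleaved loop carrying five pieces of mutable state (two counters, the node dict and both output lists) by a flatten-select step, a first pass that only builds the node-id table (ids are len(nodes)+1 on first sight), and comprehensions that emit the node and connection rows.
import Mathlib
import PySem

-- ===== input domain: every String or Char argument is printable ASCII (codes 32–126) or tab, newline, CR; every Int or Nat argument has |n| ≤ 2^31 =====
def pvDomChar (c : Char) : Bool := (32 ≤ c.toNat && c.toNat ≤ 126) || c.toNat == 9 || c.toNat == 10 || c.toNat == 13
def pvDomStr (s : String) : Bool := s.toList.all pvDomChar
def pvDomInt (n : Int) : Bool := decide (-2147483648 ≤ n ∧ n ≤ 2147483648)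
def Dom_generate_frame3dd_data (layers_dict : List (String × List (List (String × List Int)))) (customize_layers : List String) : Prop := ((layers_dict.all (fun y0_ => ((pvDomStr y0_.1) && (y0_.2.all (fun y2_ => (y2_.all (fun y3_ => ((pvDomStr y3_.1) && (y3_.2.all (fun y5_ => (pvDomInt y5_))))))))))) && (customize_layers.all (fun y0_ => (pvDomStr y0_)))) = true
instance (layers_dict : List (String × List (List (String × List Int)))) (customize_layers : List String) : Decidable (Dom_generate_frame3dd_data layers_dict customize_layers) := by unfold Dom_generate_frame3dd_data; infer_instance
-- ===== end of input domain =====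

-- B replaces A's single interleaved loop (five pieces of mutable state) by flatten-select,
-- a node-table pass, and two comprehensions emitting the rows; same cost, simpler shape.

-- ===== PORT A =====
-- conexion[k]: Python dict lookup on the association list (duplicate keys collapse to the
-- last value, as Python dict construction does); Pre_ guarantees the key is present — the
-- default [] is never reached on admitted inputs, where this is exact.
def pvLookupPt (c : List (String × List Int)) (k : String) : List Int :=
  (PySem.Dict.ofList c).getD k []

-- the body of A's inner loop, on the state (id_counter, id_conexion, nodes_dict, nodes_list, conexions_list)
def pvStepConA
    (st : Int × Int × PySem.Dict (List Int) Int × List (List Int) × List (List Int))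
    (conexion : List (String × List Int)) :
    Int × Int × PySem.Dict (List Int) Int × List (List Int) × List (List Int) :=
  let start := pvLookupPt conexion "start_point"
  let endp := pvLookupPt conexion "end_point"
  match st with
  | (id_counter, id_conexion, nodes_dict, nodes_list, conexions_list) =>
    let t1 : Int × PySem.Dict (List Int) Int × List (List Int) :=
      if nodes_dict.contains start then (id_counter, nodes_dict, nodes_list)
      else (id_counter + 1, nodes_dict.insert start id_counter, nodes_list ++ [id_counter :: start])
    let t2 : Int × PySem.Dict (List Int) Int × List (List Int) :=
      if t1.2.1.contains endp then t1
      else (t1.1 + 1, t1.2.1.insert endp t1.1, t1.2.2 ++ [t1.1 :: endp])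
    (t2.1, id_conexion + 1, t2.2.1, t2.2.2,
     conexions_list ++ [[id_conexion, t2.2.1.getD start 0, t2.2.1.getD endp 0]])

def generate_frame3dd_data (layers_dict : List (String × List (List (String × List Int)))) (customize_layers : List String) : List (List Int) × List (List Int) :=
  let st := (PySem.Dict.ofList layers_dict).items.foldl
    (fun st p => if customize_layers.contains p.1 then p.2.foldl pvStepConA st else st)
    (1, 1, PySem.Dict.empty, [], [])
  (st.2.2.2.1, st.2.2.2.2)

-- ===== PORT B =====
-- the selected-connections comprehension
def pvSelected (layers_dict : List (String × List (List (String × List Int)))) (customize_layers : List String) : List (List (String × List Int)) :=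
  ((PySem.Dict.ofList layers_dict).items.filter
    (fun p => customize_layers.contains p.1)).flatMap (fun p => p.2)

-- 'if point not in nodes: nodes[point] = len(nodes) + 1'
def pvAddPt (nd : PySem.Dict (List Int) Int) (p : List Int) : PySem.Dict (List Int) Int :=
  if nd.contains p then nd else nd.insert p ((nd.size : Int) + 1)

-- B's inner 'for point in (c["start_point"], c["end_point"])' loop body
def pvStepNodes (nd : PySem.Dict (List Int) Int) (c : List (String × List Int)) : PySem.Dict (List Int) Int :=
  [pvLookupPt c "start_point", pvLookupPt c "end_point"].foldl pvAddPt nd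

def pvNodes (selected : List (List (String × List Int))) : PySem.Dict (List Int) Int :=
  selected.foldl pvStepNodes PySem.Dict.empty

def generate_frame3dd_data_alt (layers_dict : List (String × List (List (String × List Int)))) (customize_layers : List String) : List (List Int) × List (List Int) :=
  let selected := pvSelected layers_dict customize_layers
  let nodes := pvNodes selected
  (nodes.items.map (fun p => p.2 :: p.1),
   (PySem.List.enumerate selected 1).map (fun p =>
      [p.1, nodes.getD (pvLookupPt p.2 "start_point") 0,
            nodes.getD (pvLookupPt p.2 "end_point") 0]))

-- ===== PRECONDITION & SPEC =====
-- Pre_ excludes exactly the inputs on which the Python A raises KeyError: a connection of a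
-- selected layer (after Python's dict construction collapses duplicate layer keys) missing
-- the "start_point" or "end_point" key.
def Pre_generate_frame3dd_data (layers_dict : List (String × List (List (String × List Int)))) (customize_layers : List String) : Prop :=
  ∀ p ∈ (PySem.Dict.ofList layers_dict).items, p.1 ∈ customize_layers →
    ∀ c ∈ p.2, "start_point" ∈ c.map Prod.fst ∧ "end_point" ∈ c.map Prod.fst
instance (layers_dict : List (String × List (List (String × List Int)))) (customize_layers : List String) : Decidable (Pre_generate_frame3dd_data layers_dict customize_layers) := by unfold Pre_generate_frame3dd_data; infer_instance

def pvWitness_generate_frame3dd_data : (List (String × List (List (String × List Int)))) × List String :=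
  ([("beams", [[("start_point", [0, 0]), ("end_point", [1, 0])],
               [("start_point", [1, 0]), ("end_point", [1, 2])]]),
    ("other", [[("color", [7])]])],
   ["beams"])

def Spec_generate_frame3dd_data (layers_dict : List (String × List (List (String × List Int)))) (customize_layers : List String) (out : List (List Int) × List (List Int)) : Prop := out = generate_frame3dd_data_alt layers_dict customize_layers
instance (layers_dict : List (String × List (List (String × List Int)))) (customize_layers : List String) (out : List (List Int) × List (List Int)) : Decidable (Spec_generate_frame3dd_data layers_dict customize_layers out) := by unfold Spec_generate_frame3dd_data; infer_instance

-- ===== CLAIM (what is proved, stated in full; the proofs are below) =====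
def Claim_equal_generate_frame3dd_data : Prop := ∀ (layers_dict : List (String × List (List (String × List Int)))) (customize_layers : List String), Dom_generate_frame3dd_data layers_dict customize_layers → Pre_generate_frame3dd_data layers_dict customize_layers → Spec_generate_frame3dd_data layers_dict customize_layers (generate_frame3dd_data layers_dict customize_layers)

-- ===== LEMMAS AND PROOFS =====

-- A's guarded outer loop over the dict items is the fold of the inner body over B's flattened selection
theorem pv_foldl_filter_flatMap {α β σ : Type} (P : α → Bool) (g : α → List β) (f : σ → β → σ) :
    ∀ (l : List α) (init : σ),
      l.foldl (fun st a => if P a then (g a).foldl f st else st) init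
        = ((l.filter P).flatMap g).foldl f init := by
  intro l
  induction l with
  | nil => intro init; rfl
  | cons a l ih =>
    intro init
    by_cases h : P a
    · simp [h, List.foldl_append, ih]
    · simp [h, ih]

theorem pv_contains_addPt (nd : PySem.Dict (List Int) Int) (p q : List Int)
    (h : nd.contains q = true) : (pvAddPt nd p).contains q = true := by
  unfold pvAddPt
  by_cases hp : nd.contains p
  · simp [hp, h]
  · simp [hp, PySem.Dict.contains_insert, h]

theorem pv_getD_addPt (nd : PySem.Dict (List Int) Int) (p q : List Int)
    (h : nd.contains q = true) : (pvAddPt nd p).getD q 0 = nd.getD q 0 := by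
  unfold pvAddPt
  by_cases hp : nd.contains p
  · simp [hp]
  · have hne : q ≠ p := by
      intro he; rw [he] at h; simp [h] at hp
    simp [hp, PySem.Dict.getD_insert, hne]

theorem pv_contains_stepNodes (nd : PySem.Dict (List Int) Int) (c : List (String × List Int))
    (q : List Int) (h : nd.contains q = true) : (pvStepNodes nd c).contains q = true := by
  unfold pvStepNodes
  simp only [List.foldl]
  exact pv_contains_addPt _ _ _ (pv_contains_addPt _ _ _ h)

theorem pv_persist (sel : List (List (String × List Int))) :
    ∀ (nd : PySem.Dict (List Int) Int) (q : List Int), nd.contains q = true →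
      (sel.foldl pvStepNodes nd).getD q 0 = nd.getD q 0
        ∧ (sel.foldl pvStepNodes nd).contains q = true := by
  induction sel with
  | nil => intro nd q h; exact ⟨rfl, h⟩
  | cons c sel ih =>
    intro nd q h
    have h1 : (pvStepNodes nd c).contains q = true := pv_contains_stepNodes nd c q h
    have h2 : (pvStepNodes nd c).getD q 0 = nd.getD q 0 := by
      unfold pvStepNodes
      simp only [List.foldl]
      rw [pv_getD_addPt _ _ _ (pv_contains_addPt _ _ _ h), pv_getD_addPt _ _ _ h]
    obtain ⟨ha, hb⟩ := ih (pvStepNodes nd c) q h1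
    exact ⟨by simpa [h2] using ha, hb⟩

theorem pv_nodup_addPt (nd : PySem.Dict (List Int) Int) (p : List Int)
    (h : nd.keys.Nodup) : (pvAddPt nd p).keys.Nodup := by
  unfold pvAddPt
  by_cases hp : nd.contains p
  · simpa [hp] using h
  · simpa [hp] using PySem.Dict.nodup_keys_insert (d := nd) (k := p) (v := (nd.size : Int) + 1) h

theorem pv_nodup_stepNodes (nd : PySem.Dict (List Int) Int) (c : List (String × List Int))
    (h : nd.keys.Nodup) : (pvStepNodes nd c).keys.Nodup := by
  unfold pvStepNodes
  simp only [List.foldl]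
  exact pv_nodup_addPt _ _ (pv_nodup_addPt _ _ h)

def pvItemsMap (nd : PySem.Dict (List Int) Int) : List (List Int) :=
  nd.items.map (fun p => p.2 :: p.1)

theorem pv_itemsMap_insert_fresh (nd : PySem.Dict (List Int) Int) (v : Int) (p : List Int)
    (h : nd.contains p = false) :
    List.map (fun q => q.2 :: q.1) (nd.insert p v).items
      = List.map (fun q => q.2 :: q.1) nd.items ++ [v :: p] := by
  rw [PySem.Dict.items_insert_of_not_contains nd v h]; simp

theorem pv_stepA_related (nd : PySem.Dict (List Int) Int) (k : Int)
    (cl : List (List Int)) (c : List (String × List Int)) :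
    pvStepConA ((nd.size : Int) + 1, k, nd, pvItemsMap nd, cl) c
      = (((pvStepNodes nd c).size : Int) + 1, k + 1, pvStepNodes nd c,
         pvItemsMap (pvStepNodes nd c),
         cl ++ [[k, (pvStepNodes nd c).getD (pvLookupPt c "start_point") 0,
                    (pvStepNodes nd c).getD (pvLookupPt c "end_point") 0]]) := by
  unfold pvStepConA pvStepNodes pvAddPt pvItemsMap
  simp only [List.foldl]
  by_cases hs : nd.contains (pvLookupPt c "start_point")
  · simp only [hs, if_true]
    by_cases he : nd.contains (pvLookupPt c "end_point")
    · simp [he]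
    · simp [he, PySem.Dict.size_insert,
        pv_itemsMap_insert_fresh nd _ _ (by simpa using he)]
  · simp only [hs, Bool.false_eq_true, if_false]
    by_cases he : (nd.insert (pvLookupPt c "start_point") ((nd.size : Int) + 1)).contains (pvLookupPt c "end_point")
    · simp [he, PySem.Dict.size_insert, hs,
        pv_itemsMap_insert_fresh nd _ _ (by simpa using hs)]
    · simp [he, PySem.Dict.size_insert, hs,
        pv_itemsMap_insert_fresh nd _ _ (by simpa using hs),
        pv_itemsMap_insert_fresh _ _ _ (by simpa using he)]

theorem pv_loop_related (sel : List (List (String × List Int))) :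
    ∀ (nd : PySem.Dict (List Int) Int) (k : Int) (cl : List (List Int)),
      nd.keys.Nodup →
      sel.foldl pvStepConA ((nd.size : Int) + 1, k, nd, pvItemsMap nd, cl)
        = (((sel.foldl pvStepNodes nd).size : Int) + 1, k + sel.length,
           sel.foldl pvStepNodes nd, pvItemsMap (sel.foldl pvStepNodes nd),
           cl ++ (PySem.List.enumerate sel k).map (fun p =>
             [p.1, (sel.foldl pvStepNodes nd).getD (pvLookupPt p.2 "start_point") 0,
                   (sel.foldl pvStepNodes nd).getD (pvLookupPt p.2 "end_point") 0])) := by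
  induction sel with
  | nil => intro nd k cl _; simp [PySem.List.enumerate]
  | cons c sel ih =>
    intro nd k cl hnd
    have hcs : (pvStepNodes nd c).contains (pvLookupPt c "start_point") = true := by
      unfold pvStepNodes pvAddPt
      simp only [List.foldl]
      by_cases hs : nd.contains (pvLookupPt c "start_point")
      · exact pv_contains_addPt _ _ _ (by simp [hs])
      · exact pv_contains_addPt _ _ _ (by simp [hs, PySem.Dict.contains_insert_self])
    have hce : (pvStepNodes nd c).contains (pvLookupPt c "end_point") = true := by
      unfold pvStepNodes pvAddPt
      simp only [List.foldl]
      by_cases he : (if nd.contains (pvLookupPt c "start_point") then nd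
          else nd.insert (pvLookupPt c "start_point") ((nd.size : Int) + 1)).contains
            (pvLookupPt c "end_point")
      · simp [he]
      · simp [he, PySem.Dict.contains_insert_self]
    obtain ⟨hps, _⟩ := pv_persist sel (pvStepNodes nd c) _ hcs
    obtain ⟨hpe, _⟩ := pv_persist sel (pvStepNodes nd c) _ hce
    rw [List.foldl_cons, pv_stepA_related nd k cl c,
        ih (pvStepNodes nd c) (k + 1) _ (pv_nodup_stepNodes nd c hnd)]
    rw [List.foldl_cons]
    simp [PySem.List.enumerate_cons, hps, hpe, List.append_assoc]
    omega

-- ===== VERDICT (by name: the statement is the Claim_ definition above) =====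
theorem generate_frame3dd_data_spec : Claim_equal_generate_frame3dd_data := by
  intro layers_dict customize_layers _ _
  unfold Spec_generate_frame3dd_data generate_frame3dd_data generate_frame3dd_data_alt
  rw [pv_foldl_filter_flatMap (fun p => customize_layers.contains p.1) (fun p => p.2)
        pvStepConA (PySem.Dict.ofList layers_dict).items]
  have h0 : (1, 1, PySem.Dict.empty, ([] : List (List Int)), ([] : List (List Int)))
      = (((PySem.Dict.empty : PySem.Dict (List Int) Int).size : Int) + 1, (1 : Int),
         (PySem.Dict.empty : PySem.Dict (List Int) Int),
         pvItemsMap PySem.Dict.empty, ([] : List (List Int))) := by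
    rfl
  rw [h0, pv_loop_related _ PySem.Dict.empty 1 [] (by decide)]
  rfl
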